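-- pv_equiv track=rewrite | github.com/akisileva/test | 3nomessage.py | process_dialogue
-- ===== SOURCE A (Python) =====
-- def process_dialogue(dialogue):
--
--     utterances = dialogue.split(';')
--     human_index = next((i for i, utterance in enumerate(utterances) if utterance.strip().startswith('human')), None)
--     if human_index is None:
--         return dialogue.strip()
--
--     if human_index != 0:
--         utterances = utterances[human_index:]
--     for i in range(len(utterances) - 1, -1, -1):
--         if utterances[i].strip().startswith('bot'):
--             utterances = utterances[:i + 1]
--             break
--
--     processed_dialogue = '; '.join(utterances)
--     return processed_dialogue.strip()
-- ===== SOURCE B (Python) =====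
-- def _from_human(parts):
--     # recursive: suffix of parts starting at the first 'human' utterance, or None
--     if not parts:
--         return None
--     if parts[0].strip().startswith('human'):
--         return parts
--     return _from_human(parts[1:])
--
--
-- def _trim_to_last_bot(parts):
--     # recursive on the structure: returns (trimmed, found) where trimmed is parts cut
--     # after the last 'bot' utterance (unchanged when found is False)
--     if not parts:
--         return [], False
--     rest, found = _trim_to_last_bot(parts[1:])
--     if found:
--         return [parts[0]] + rest, True
--     if parts[0].strip().startswith('bot'):
--         return [parts[0]], True
--     return [parts[0]] + rest, False
--
--
-- def process_dialogue(dialogue):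
--     tail = _from_human(dialogue.split(';'))
--     if tail is None:
--         return dialogue.strip()
--     trimmed, _ = _trim_to_last_bot(tail)
--     return '; '.join(trimmed).strip()
-- ===== Notes on version B (the rewrite author's own statement) =====
-- stated objective: alternative
-- what changed: B is index-free structural recursion: a recursive helper returns the suffix starting at the first 'human' utterance, and a second recursion over that suffix rebuilds it while cutting after the last 'bot', replacing A's enumerate/index search, backward range loop and slicing.
import Mathlib
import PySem

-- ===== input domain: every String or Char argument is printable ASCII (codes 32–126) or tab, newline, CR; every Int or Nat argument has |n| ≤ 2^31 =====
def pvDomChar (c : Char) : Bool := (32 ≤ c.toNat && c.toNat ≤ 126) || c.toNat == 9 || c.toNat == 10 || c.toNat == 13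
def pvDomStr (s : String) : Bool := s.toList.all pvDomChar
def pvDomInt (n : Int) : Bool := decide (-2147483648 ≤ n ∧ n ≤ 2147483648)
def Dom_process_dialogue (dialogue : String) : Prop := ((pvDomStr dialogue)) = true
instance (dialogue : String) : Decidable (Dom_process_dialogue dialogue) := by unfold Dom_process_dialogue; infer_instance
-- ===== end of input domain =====

-- B replaces A's index search, backward range loop and slicing by index-free structural
-- recursion: one recursion finds the suffix at the first 'human' utterance, a second
-- rebuilds it while cutting after the last 'bot' (alternative decomposition, same cost).

-- ===== PORT A =====
-- next((i for i, utterance in enumerate(utterances) if utterance.strip().startswith('human')), None)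
def pvFindHuman : List (Int × String) → Option Int
  | [] => none
  | (i, u) :: rest =>
      if PySem.Str.startswith (PySem.Str.strip u) "human" then some i else pvFindHuman rest

-- the backward for-loop with break: utterances = utterances[:i+1] on the first (highest) bot hit
def pvBotCut (utterances : List String) : List Int → List String
  | [] => utterances
  | i :: rest =>
      if PySem.Str.startswith (PySem.Str.strip (PySem.List.pyGetD utterances i "")) "bot" then
        PySem.List.slice utterances none (some (i + 1))
      else pvBotCut utterances rest

def process_dialogue (dialogue : String) : String :=
  let utterances := (PySem.Str.split? dialogue ";").getD []   -- ";" ≠ "": split? never returns none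
  match pvFindHuman (PySem.List.enumerate utterances 0) with
  | none => PySem.Str.strip dialogue
  | some humanIndex =>
      let utterances :=
        if humanIndex ≠ 0 then PySem.List.slice utterances (some humanIndex) none else utterances
      let utterances :=
        pvBotCut utterances (PySem.List.pyRange ((utterances.length : Int) - 1) (-1) (-1))
      PySem.Str.strip (PySem.Str.join "; " utterances)

-- ===== PORT B =====
-- _from_human: recursive suffix at the first 'human' utterance
def pvFromHuman : List String → Option (List String)
  | [] => none
  | u :: rest =>
      if PySem.Str.startswith (PySem.Str.strip u) "human" then some (u :: rest)
      else pvFromHuman rest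

-- _trim_to_last_bot: (trimmed, found), recursion on the structure
def pvTrimToLastBot : List String → List String × Bool
  | [] => ([], false)
  | u :: rest =>
      let (r, found) := pvTrimToLastBot rest
      if found then (u :: r, true)
      else if PySem.Str.startswith (PySem.Str.strip u) "bot" then ([u], true)
      else (u :: r, false)

def process_dialogue_alt (dialogue : String) : String :=
  match pvFromHuman ((PySem.Str.split? dialogue ";").getD []) with   -- ";" ≠ "": split? never none
  | none => PySem.Str.strip dialogue
  | some tail => PySem.Str.strip (PySem.Str.join "; " (pvTrimToLastBot tail).1)

-- ===== PRECONDITION & SPEC =====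
def Spec_process_dialogue (dialogue : String) (out : String) : Prop := out = process_dialogue_alt dialogue
instance (dialogue : String) (out : String) : Decidable (Spec_process_dialogue dialogue out) := by unfold Spec_process_dialogue; infer_instance

-- ===== CLAIM (what is proved, stated in full; the proofs are below) =====
def Claim_equal_process_dialogue : Prop := ∀ (dialogue : String), Dom_process_dialogue dialogue → Spec_process_dialogue dialogue (process_dialogue dialogue)

-- ===== LEMMAS AND PROOFS =====

def pvIsHuman (u : String) : Bool := PySem.Str.startswith (PySem.Str.strip u) "human"
def pvIsBot (u : String) : Bool := PySem.Str.startswith (PySem.Str.strip u) "bot"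

theorem pvIsHuman_eq (u : String) : PySem.Str.startswith (PySem.Str.strip u) "human" = pvIsHuman u := rfl
theorem pvIsBot_eq (u : String) : PySem.Str.startswith (PySem.Str.strip u) "bot" = pvIsBot u := rfl

-- index of the LAST element satisfying p
def pvLastIdx? (p : String → Bool) : List String → Option Nat
  | [] => none
  | x :: xs =>
      match pvLastIdx? p xs with
      | some n => some (n + 1)
      | none => if p x then some 0 else none

theorem pvFindHuman_eq (xs : List String) (s : Int) :
    pvFindHuman (PySem.List.enumerate xs s) = (xs.findIdx? pvIsHuman).map (fun n : Nat => s + (n : Int)) := by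
  induction xs generalizing s with
  | nil => simp [pvFindHuman, PySem.List.enumerate_nil]
  | cons x xs ih =>
      rw [PySem.List.enumerate_cons, List.findIdx?_cons]
      simp only [pvFindHuman, pvIsHuman_eq]
      by_cases h : pvIsHuman x
      · rw [if_pos h, if_pos h]; simp
      · rw [if_neg h, if_neg h, ih, Option.map_map]
        cases List.findIdx? pvIsHuman xs with
        | none => rfl
        | some n =>
            simp only [Option.map_some, Function.comp_apply, Option.some.injEq]
            push_cast; ring

theorem pvFromHuman_eq (xs : List String) :
    pvFromHuman xs = (xs.findIdx? pvIsHuman).map (fun n : Nat => xs.drop n) := by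
  induction xs with
  | nil => simp [pvFromHuman]
  | cons x xs ih =>
      rw [List.findIdx?_cons]
      simp only [pvFromHuman, pvIsHuman_eq]
      by_cases h : pvIsHuman x
      · rw [if_pos h, if_pos h]; simp
      · rw [if_neg h, if_neg h, ih, Option.map_map]
        cases List.findIdx? pvIsHuman xs with
        | none => rfl
        | some n => simp

theorem pvTrimToLastBot_spec (xs : List String) :
    pvTrimToLastBot xs =
      (match pvLastIdx? pvIsBot xs with
       | some k => xs.take (k + 1)
       | none => xs,
       (pvLastIdx? pvIsBot xs).isSome) := by
  induction xs with
  | nil => simp [pvTrimToLastBot, pvLastIdx?]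
  | cons x xs ih =>
      simp only [pvTrimToLastBot, pvIsBot_eq, pvLastIdx?, ih]
      cases h : pvLastIdx? pvIsBot xs with
      | some n => simp
      | none =>
          by_cases hb : pvIsBot x
          · rw [if_pos hb, if_pos hb]; simp
          · rw [if_neg hb, if_neg hb]; simp

theorem pvLastIdx?_append (p : String → Bool) (as bs : List String) :
    pvLastIdx? p (as ++ bs) =
      match pvLastIdx? p bs with
      | some k => some (as.length + k)
      | none => pvLastIdx? p as := by
  induction as with
  | nil =>
      simp only [List.nil_append]
      cases h : pvLastIdx? p bs <;> simp [pvLastIdx?]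
  | cons a as ih =>
      simp only [List.cons_append, pvLastIdx?, ih, List.length_cons]
      cases h1 : pvLastIdx? p bs <;> cases h2 : pvLastIdx? p as <;> by_cases hp : p a <;>
        simp [hp] <;> omega

theorem pvBotCut_spec (n : Nat) (xs : List String) (hn : n ≤ xs.length) :
    pvBotCut xs (PySem.List.pyRange ((n : Int) - 1) (-1) (-1)) =
      match pvLastIdx? pvIsBot (xs.take n) with
      | some k => xs.take (k + 1)
      | none => xs := by
  induction n with
  | zero => simp [PySem.List.pyRange_neg_one_eq_nil, pvBotCut, pvLastIdx?]
  | succ m ih =>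
      have hm : m < xs.length := by omega
      have hr : PySem.List.pyRange ((↑(m + 1) : Int) - 1) (-1) (-1) =
          (m : Int) :: PySem.List.pyRange ((m : Int) - 1) (-1) (-1) := by
        have he : ((↑(m + 1) : Int) - 1) = (m : Int) := by push_cast; ring
        rw [he, PySem.List.pyRange_neg_one_cons (by omega)]
      rw [hr]
      have hget : PySem.List.pyGetD xs ((m : Int)) "" = xs[m] := by
        simp [PySem.List.pyGetD_natCast, List.getD_eq_getElem?_getD, hm]
      have htake : xs.take (m + 1) = xs.take m ++ [xs[m]] := by
        rw [List.take_add_one]; simp [hm]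
      have hlen : (xs.take m).length = m := by simp; omega
      rw [htake, pvLastIdx?_append]
      have hsing : pvLastIdx? pvIsBot [xs[m]] = if pvIsBot xs[m] then some 0 else none := by
        simp [pvLastIdx?]
      rw [hsing]
      simp only [pvBotCut, hget, pvIsBot_eq]
      by_cases hb : pvIsBot xs[m]
      · rw [if_pos hb, if_pos hb, PySem.List.slice_to xs (by omega : (0:Int) ≤ (m : Int) + 1)]
        have ht : ((m : Int) + 1).toNat = m + 1 := by omega
        rw [ht]
        simp [hlen]
      · rw [if_neg hb, if_neg hb]
        exact ih (by omega)

-- ===== VERDICT (by name: the statement is the Claim_ definition above) =====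
theorem process_dialogue_spec : Claim_equal_process_dialogue := by
  intro dialogue _
  unfold Spec_process_dialogue process_dialogue process_dialogue_alt
  simp only []
  generalize (PySem.Str.split? dialogue ";").getD [] = xs
  rw [pvFindHuman_eq, pvFromHuman_eq]
  cases hfind : xs.findIdx? pvIsHuman with
  | none => simp
  | some h =>
      have hh : h < xs.length := by
        have := List.findIdx?_eq_some_iff_findIdx_eq.mp hfind
        omega
      simp only [Option.map_some, zero_add]
      have hdrop : (if (h : Int) ≠ 0 then PySem.List.slice xs (some (h : Int)) none else xs) = xs.drop h := by
        by_cases h0 : h = 0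
        · subst h0; simp
        · rw [if_pos (by exact_mod_cast h0), PySem.List.slice_from_natCast]
      rw [hdrop, pvBotCut_spec (xs.drop h).length (xs.drop h) (le_refl _), List.take_length,
        pvTrimToLastBot_spec]
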